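-- pv_equiv track=rewrite | github.com/vnchurmanov/Educational | 003_Professional/2_Repeat/2.1_Choose_plural.py | choose_plural
-- ===== SOURCE A (Python) =====
-- def choose_plural(amount, declens_tuple):
--     ending_vars = {(0,): 2, (1,): 0, (2, 3, 4): 1, (_ for _ in range(5, 21)): 2}
--     end_digit = amount
--     if len(str(end_digit)) >= 2:
--         if 10 <= int(str(amount)[-2:]) <= 20:
--             end_digit = int(str(amount)[-2:])
--         else:
--             end_digit = int(str(amount)[-1])
--     index_of_end = [value for key, value in ending_vars.items() if end_digit in key]
--     return f"{amount} {declens_tuple[index_of_end[0]]}"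
-- ===== SOURCE B (Python) =====
-- def choose_plural(amount, declens_tuple):
--     m = abs(amount)
--     two = m % 100
--     d = two if 10 <= two <= 20 else m % 10
--     if d == 1:
--         idx = 0
--     elif d in (2, 3, 4):
--         idx = 1
--     else:
--         idx = 2
--     return f"{amount} {declens_tuple[idx]}"
-- ===== Notes on version B (the rewrite author's own statement) =====
-- stated objective: simpler
-- what changed: Selects the plural form by modular arithmetic on abs(amount) (last two digits via %100, last digit via %10) and a plain if/elif chain, instead of parsing str(amount) slices back with int() and filtering a dict keyed by tuples and a one-shot generator.
import Mathlib
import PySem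

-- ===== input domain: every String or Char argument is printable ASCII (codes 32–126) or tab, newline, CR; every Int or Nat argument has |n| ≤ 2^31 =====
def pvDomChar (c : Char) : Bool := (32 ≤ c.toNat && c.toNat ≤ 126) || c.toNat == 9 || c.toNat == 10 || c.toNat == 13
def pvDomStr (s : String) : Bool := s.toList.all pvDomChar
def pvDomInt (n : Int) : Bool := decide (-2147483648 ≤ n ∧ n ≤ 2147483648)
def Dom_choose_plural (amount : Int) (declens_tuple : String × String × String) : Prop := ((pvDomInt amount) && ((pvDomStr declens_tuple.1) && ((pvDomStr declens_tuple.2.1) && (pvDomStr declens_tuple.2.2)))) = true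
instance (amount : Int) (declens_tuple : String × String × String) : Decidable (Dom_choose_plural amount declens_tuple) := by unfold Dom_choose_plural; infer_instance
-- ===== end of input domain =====

-- B replaces A's str(amount)-slicing + dict-with-generator-key lookup by modular
-- arithmetic on abs(amount) and a plain if/elif chain (objective: simpler).

-- ===== PORT A =====
-- A's dict {(0,):2, (1,):0, (2,3,4):1, (gen 5..20):2}: each key ported as the list
-- of its elements ('end_digit in key' tests membership; the generator is consumed once)
def pvEndingVars : List (List Int × Int) :=
  [([0], 2), ([1], 0), ([2, 3, 4], 1), (PySem.List.pyRange 5 21 1, 2)]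

-- A's end_digit: len(str(amount)), int(str(amount)[-2:]), int(str(amount)[-1]) via PySem.
-- The .getD defaults are never reached: both parses always succeed on slices of str(amount).
def pvEndDigitA (amount : Int) : Int :=
  let s : List Char := PySem.Int.toChars amount
  if 2 ≤ s.length then
    if 10 ≤ (PySem.Int.ofChars? (PySem.List.slice s (some (-2)) none)).getD 0 ∧
        (PySem.Int.ofChars? (PySem.List.slice s (some (-2)) none)).getD 0 ≤ 20 then
      (PySem.Int.ofChars? (PySem.List.slice s (some (-2)) none)).getD 0
    else
      (PySem.Int.ofChars? (((PySem.List.pyGet? s (-1)).map (fun c => [c])).getD [])).getD 0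
  else amount

def choose_plural (amount : Int) (declens_tuple : String × String × String) : String :=
  let end_digit := pvEndDigitA amount
  let index_of_end : List Int :=
    (pvEndingVars.filter (fun kv => kv.1.contains end_digit)).map (fun kv => kv.2)
  -- index_of_end[0] (never empty), then declens_tuple[idx] (idx is always 0, 1 or 2)
  let idx : Int := (PySem.List.pyGet? index_of_end 0).getD 0
  PySem.Int.toStr amount ++ " " ++
    (if idx = 0 then declens_tuple.1 else if idx = 1 then declens_tuple.2.1 else declens_tuple.2.2)

-- ===== PORT B =====
def choose_plural_alt (amount : Int) (declens_tuple : String × String × String) : String :=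
  let m : Int := |amount|
  let two : Int := PySem.Int.mod m 100
  let d : Int := if 10 ≤ two ∧ two ≤ 20 then two else PySem.Int.mod m 10
  let idx : Int := if d = 1 then 0 else if d = 2 ∨ d = 3 ∨ d = 4 then 1 else 2
  PySem.Int.toStr amount ++ " " ++
    (if idx = 0 then declens_tuple.1 else if idx = 1 then declens_tuple.2.1 else declens_tuple.2.2)

-- ===== PRECONDITION & SPEC =====
def Spec_choose_plural (amount : Int) (declens_tuple : String × String × String) (out : String) : Prop := out = choose_plural_alt amount declens_tuple
instance (amount : Int) (declens_tuple : String × String × String) (out : String) : Decidable (Spec_choose_plural amount declens_tuple out) := by unfold Spec_choose_plural; infer_instance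

-- ===== CLAIM (what is proved, stated in full; the proofs are below) =====
def Claim_equal_choose_plural : Prop := ∀ (amount : Int) (declens_tuple : String × String × String), Dom_choose_plural amount declens_tuple → Spec_choose_plural amount declens_tuple (choose_plural amount declens_tuple)

-- ===== LEMMAS AND PROOFS =====

-- parsing back a one-digit / two-digit / minus-one-digit numeral slice
lemma pvParseOne (a : Nat) (ha : a < 10) :
    PySem.Int.ofChars? [Nat.digitChar a] = some (a : Int) := by
  interval_cases a <;> decide

lemma pvParseTwo (a b : Nat) (ha : a < 10) (hb : b < 10) :
    PySem.Int.ofChars? [Nat.digitChar a, Nat.digitChar b] = some ((10 * a + b : Nat) : Int) := by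
  interval_cases a <;> interval_cases b <;> decide

lemma pvParseNeg (a : Nat) (ha : a < 10) :
    PySem.Int.ofChars? ['-', Nat.digitChar a] = some (-(a : Int)) := by
  interval_cases a <;> decide

-- str(m) of m ≥ 10 ends with its last two digit characters
lemma pvToDigitsLastTwo (m : Nat) (h : 10 ≤ m) :
    ∃ pre, Nat.toDigits 10 m = pre ++ [Nat.digitChar (m / 10 % 10), Nat.digitChar (m % 10)] := by
  by_cases h100 : m < 100
  · refine ⟨[], ?_⟩
    rw [Nat.toDigits_of_base_le (by norm_num) h,
        Nat.toDigits_of_lt_base (show m / 10 < 10 by omega)]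
    have hq : m / 10 % 10 = m / 10 := Nat.mod_eq_of_lt (by omega)
    simp [hq]
  · refine ⟨Nat.toDigits 10 (m / 100), ?_⟩
    rw [Nat.toDigits_of_base_le (by norm_num) h,
        Nat.toDigits_of_base_le (by norm_num) (show 10 ≤ m / 10 by omega)]
    have : m / 10 / 10 = m / 100 := by omega
    simp [this]

lemma pvSliceLastTwo (pre : List Char) (a b : Char) :
    PySem.List.slice (pre ++ [a, b]) (some (-2)) none = [a, b] := by
  rw [PySem.List.slice_from_neg_ofNat _ 2 (by norm_num),
      show (pre ++ [a, b]).length - 2 = pre.length by simp, List.drop_left]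

lemma pvLastChar (pre : List Char) (a b : Char) :
    PySem.List.pyGet? (pre ++ [a, b]) (-1) = some b := by
  rw [show pre ++ [a, b] = (pre ++ [a]) ++ [b] by simp,
      PySem.List.pyGet?_neg_one_append_singleton]

-- A's end_digit equals B's modular d
lemma pvEndDigitA_eq (amount : Int) :
    pvEndDigitA amount =
      (if 10 ≤ PySem.Int.mod |amount| 100 ∧ PySem.Int.mod |amount| 100 ≤ 20
       then PySem.Int.mod |amount| 100 else PySem.Int.mod |amount| 10) := by
  have habs : |amount| = (amount.natAbs : Int) := Int.abs_eq_natAbs amount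
  have h100 : PySem.Int.mod |amount| 100 = ((amount.natAbs % 100 : Nat) : Int) := by
    rw [habs]; exact_mod_cast PySem.Int.mod_natCast amount.natAbs 100
  have h10 : PySem.Int.mod |amount| 10 = ((amount.natAbs % 10 : Nat) : Int) := by
    rw [habs]; exact_mod_cast PySem.Int.mod_natCast amount.natAbs 10
  set m := amount.natAbs with hm
  by_cases hneg : amount < 0
  · -- str(amount) = '-' :: digits of m
    have hs : PySem.Int.toChars amount = '-' :: Nat.toDigits 10 m := by
      simp only [PySem.Int.toChars, if_pos hneg, hm]
    by_cases hm10 : m < 10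
    · -- -9 ≤ amount ≤ -1 : str is "-d", int("-d") = amount < 10
      have hm1 : 1 ≤ m := by omega
      have hdig : Nat.toDigits 10 m = [Nat.digitChar m] := Nat.toDigits_of_lt_base hm10
      have hs2 : PySem.Int.toChars amount = [] ++ ['-', Nat.digitChar m] := by
        simp [hs, hdig]
      rw [pvEndDigitA, hs2]
      rw [pvSliceLastTwo, pvParseNeg m hm10, pvLastChar]
      simp only [Option.getD_some, Option.map_some]
      rw [pvParseOne m hm10, h100, h10]
      have : ¬ (10 ≤ -(m : Int) ∧ -(m : Int) ≤ 20) := by omega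
      rw [if_neg this]
      have : ¬ (10 ≤ ((m % 100 : Nat) : Int) ∧ ((m % 100 : Nat) : Int) ≤ 20) := by
        have : m % 100 = m := Nat.mod_eq_of_lt (by omega); omega
      rw [if_neg this]
      simp only [Option.getD_some]
      have h1 : m % 10 = m := Nat.mod_eq_of_lt hm10
      have h2 : (2 : Nat) ≤ ([] ++ ['-', Nat.digitChar m] : List Char).length := by simp
      rw [if_pos h2, h1]
    · -- amount ≤ -10 : last two digit chars of m
      obtain ⟨pre, hpre⟩ := pvToDigitsLastTwo m (by omega)
      have hs2 : PySem.Int.toChars amount =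
          ('-' :: pre) ++ [Nat.digitChar (m / 10 % 10), Nat.digitChar (m % 10)] := by
        simp [hs, hpre]
      rw [pvEndDigitA, hs2]
      rw [pvSliceLastTwo, pvParseTwo _ _ (by omega) (by omega), pvLastChar]
      simp only [Option.getD_some, Option.map_some]
      rw [pvParseOne _ (by omega), h100, h10]
      have hmm : 10 * (m / 10 % 10) + m % 10 = m % 100 := by omega
      rw [hmm]
      have h2 : (2 : Nat) ≤ (('-' :: pre) ++
          [Nat.digitChar (m / 10 % 10), Nat.digitChar (m % 10)] : List Char).length := by simp
      rw [if_pos h2]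
      simp only [Option.getD_some]
  · -- 0 ≤ amount : str(amount) = digits of m
    have hcast : amount = (m : Int) := by omega
    have hs : PySem.Int.toChars amount = Nat.toDigits 10 m := by
      simp [PySem.Int.toChars, hneg, show amount.toNat = m by omega]
    by_cases hm10 : m < 10
    · -- single digit: end_digit = amount itself
      have hdig : Nat.toDigits 10 m = [Nat.digitChar m] := Nat.toDigits_of_lt_base hm10
      rw [pvEndDigitA, hs, hdig]
      have hlen : ¬ (2 : Nat) ≤ ([Nat.digitChar m] : List Char).length := by simp
      rw [if_neg hlen, h100, h10]
      have : ¬ (10 ≤ ((m % 100 : Nat) : Int) ∧ ((m % 100 : Nat) : Int) ≤ 20) := by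
        have : m % 100 = m := Nat.mod_eq_of_lt (by omega); omega
      rw [if_neg this]
      have : m % 10 = m := Nat.mod_eq_of_lt hm10
      omega
    · -- amount ≥ 10 : last two digit chars of m
      obtain ⟨pre, hpre⟩ := pvToDigitsLastTwo m (by omega)
      rw [pvEndDigitA, hs, hpre]
      rw [pvSliceLastTwo, pvParseTwo _ _ (by omega) (by omega), pvLastChar]
      simp only [Option.getD_some, Option.map_some]
      rw [pvParseOne _ (by omega), h100, h10]
      have hmm : 10 * (m / 10 % 10) + m % 10 = m % 100 := by omega
      rw [hmm]
      have h2 : (2 : Nat) ≤ (pre ++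
          [Nat.digitChar (m / 10 % 10), Nat.digitChar (m % 10)] : List Char).length := by simp
      rw [if_pos h2]
      simp only [Option.getD_some]

-- the dict-filter lookup agrees with B's if/elif chain on 0..20
lemma pvIdx (e : Int) (h0 : 0 ≤ e) (h1 : e ≤ 20) :
    (PySem.List.pyGet?
        ((pvEndingVars.filter (fun kv => kv.1.contains e)).map (fun kv => kv.2)) 0).getD 0
      = (if e = 1 then 0 else if e = 2 ∨ e = 3 ∨ e = 4 then 1 else 2) := by
  interval_cases e <;> decide

lemma pvDigitB_range (amount : Int) :
    0 ≤ (if 10 ≤ PySem.Int.mod |amount| 100 ∧ PySem.Int.mod |amount| 100 ≤ 20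
         then PySem.Int.mod |amount| 100 else PySem.Int.mod |amount| 10) ∧
    (if 10 ≤ PySem.Int.mod |amount| 100 ∧ PySem.Int.mod |amount| 100 ≤ 20
     then PySem.Int.mod |amount| 100 else PySem.Int.mod |amount| 10) ≤ 20 := by
  have h1 := PySem.Int.mod_nonneg |amount| (show (0:Int) < 10 by norm_num)
  have h2 := PySem.Int.mod_lt |amount| (show (0:Int) < 10 by norm_num)
  split_ifs with h <;> omega

-- ===== VERDICT (by name: the statement is the Claim_ definition above) =====
theorem choose_plural_spec : Claim_equal_choose_plural := by
  intro amount declens_tuple _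
  unfold Spec_choose_plural
  simp only [choose_plural, choose_plural_alt]
  rw [pvEndDigitA_eq]
  rw [pvIdx _ (pvDigitB_range amount).1 (pvDigitB_range amount).2]
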